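-- pv_equiv track=rewrite | github.com/mo-haley/g-sheet-automation | gsheet-calc/governing_docs/section_targeting.py | _build_page_offset_map
-- ===== SOURCE A (Python) =====
-- def _build_page_offset_map(page_texts: list[str]) -> list[tuple[int, int, int]]:
--     """Build a map of (page_number, start_offset, end_offset) from page texts.
--
--     Reconstructs offsets assuming pages are joined with double-newline.
--     """
--     page_map: list[tuple[int, int, int]] = []
--     offset = 0
--     for i, text in enumerate(page_texts):
--         page_start = offset
--         page_end = offset + len(text)
--         page_map.append((i + 1, page_start, page_end))
--         offset = page_end + 2  # Account for "\n\n" between pages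
--     return page_map
-- ===== SOURCE B (Python) =====
-- def _build_page_offset_map(page_texts: list[str]) -> list[tuple[int, int, int]]:
--     """Two-stage rewrite: first build a prefix table of page start offsets,
--     then combine it with the texts in a separate comprehension pass."""
--     starts = []
--     total = 0
--     for t in page_texts:
--         starts.append(total)
--         total += len(t) + 2
--     return [(i + 1, starts[i], starts[i] + len(t)) for i, t in enumerate(page_texts)]
-- ===== Notes on version B (the rewrite author's own statement) =====
-- stated objective: alternative
-- what changed: B replaces A's single stateful loop (running offset mutated while emitting tuples) with a two-stage shape: it first builds an explicit prefix table of page start offsets, then a separate comprehension over enumerate combines starts[i] with each text's length.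
import Mathlib
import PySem

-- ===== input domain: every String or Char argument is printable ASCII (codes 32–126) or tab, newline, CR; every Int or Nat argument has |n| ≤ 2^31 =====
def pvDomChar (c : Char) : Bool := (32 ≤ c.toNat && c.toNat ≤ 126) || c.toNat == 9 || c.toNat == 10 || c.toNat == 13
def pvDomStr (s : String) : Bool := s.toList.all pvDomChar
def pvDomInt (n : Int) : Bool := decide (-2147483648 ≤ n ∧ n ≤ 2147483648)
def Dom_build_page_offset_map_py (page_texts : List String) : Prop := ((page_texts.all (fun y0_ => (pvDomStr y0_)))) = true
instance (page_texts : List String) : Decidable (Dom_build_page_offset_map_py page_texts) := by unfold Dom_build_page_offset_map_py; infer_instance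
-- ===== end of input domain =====

-- B replaces A's single stateful offset loop by a prefix-start table plus a separate combining pass (alternative decomposition, same cost).

-- ===== PORT A =====
-- for i, text in enumerate(page_texts): append (i+1, offset, offset+len(text)); offset := end + 2
def build_page_offset_map_py (page_texts : List String) : List (Int × Int × Int) :=
  ((PySem.List.enumerate page_texts 0).foldl
    (fun (st : List (Int × Int × Int) × Int) p =>
      let page_start := st.2
      let page_end := st.2 + PySem.Str.len p.2
      (st.1 ++ [(p.1 + 1, page_start, page_end)], page_end + 2))
    ([], 0)).1

-- ===== PORT B =====
-- stage 1: starts table (running total appended before being advanced by len+2)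
def build_page_offset_map_py_alt (page_texts : List String) : List (Int × Int × Int) :=
  let starts :=
    (page_texts.foldl
      (fun (st : List Int × Int) t => (st.1 ++ [st.2], st.2 + PySem.Str.len t + 2))
      ([], 0)).1
  -- stage 2: [(i+1, starts[i], starts[i]+len(t)) for i, t in enumerate(page_texts)]
  (PySem.List.enumerate page_texts 0).map
    (fun p => (p.1 + 1, PySem.List.pyGetD starts p.1 0,
               PySem.List.pyGetD starts p.1 0 + PySem.Str.len p.2))

-- ===== PRECONDITION & SPEC =====
def Spec_build_page_offset_map_py (page_texts : List String) (out : List (Int × Int × Int)) : Prop := out = build_page_offset_map_py_alt page_texts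
instance (page_texts : List String) (out : List (Int × Int × Int)) : Decidable (Spec_build_page_offset_map_py page_texts out) := by unfold Spec_build_page_offset_map_py; infer_instance

-- ===== CLAIM (what is proved, stated in full; the proofs are below) =====
def Claim_equal_build_page_offset_map_py : Prop := ∀ (page_texts : List String), Dom_build_page_offset_map_py page_texts → Spec_build_page_offset_map_py page_texts (build_page_offset_map_py page_texts)

-- ===== LEMMAS AND PROOFS =====

-- the common closed recursive form of the page map, used only by the proofs
def pvGA : List String → Int → Int → List (Int × Int × Int)
  | [], _, _ => []
  | t :: r, i, off => (i + 1, off, off + PySem.Str.len t) :: pvGA r (i + 1) (off + PySem.Str.len t + 2)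

-- the closed recursive form of B's starts table
def pvGS : List String → Int → List Int
  | [], _ => []
  | t :: r, tot => tot :: pvGS r (tot + PySem.Str.len t + 2)

theorem portA_foldl (pts : List String) (i off : Int) (acc : List (Int × Int × Int)) :
    ((PySem.List.enumerate pts i).foldl
      (fun (st : List (Int × Int × Int) × Int) p =>
        let page_start := st.2
        let page_end := st.2 + PySem.Str.len p.2
        (st.1 ++ [(p.1 + 1, page_start, page_end)], page_end + 2))
      (acc, off)).1 = acc ++ pvGA pts i off := by
  induction pts generalizing i off acc with
  | nil => simp [PySem.List.enumerate_nil, pvGA]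
  | cons t r ih =>
    simp only [PySem.List.enumerate_cons, List.foldl_cons, pvGA, ih, List.append_assoc,
      List.singleton_append]

theorem starts_foldl (pts : List String) (tot : Int) (acc : List Int) :
    (pts.foldl (fun (st : List Int × Int) t => (st.1 ++ [st.2], st.2 + PySem.Str.len t + 2))
      (acc, tot)).1 = acc ++ pvGS pts tot := by
  induction pts generalizing tot acc with
  | nil => simp [pvGS]
  | cons t r ih =>
    simp only [List.foldl_cons, pvGS, ih, List.append_assoc, List.singleton_append]

theorem portB_map (pts : List String) (i : Nat) (off : Int) (pre : List Int)
    (hpre : pre.length = i) :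
    (PySem.List.enumerate pts (i : Int)).map
      (fun p => (p.1 + 1, PySem.List.pyGetD (pre ++ pvGS pts off) p.1 0,
                 PySem.List.pyGetD (pre ++ pvGS pts off) p.1 0 + PySem.Str.len p.2))
      = pvGA pts (i : Int) off := by
  induction pts generalizing i off pre with
  | nil => simp [PySem.List.enumerate_nil, pvGA]
  | cons t r ih =>
    have hget : PySem.List.pyGetD (pre ++ pvGS (t :: r) off) (i : Int) 0 = off := by
      rw [PySem.List.pyGetD_natCast]
      simp [pvGS, List.getD, ← hpre]
    have hrec := ih (i := i + 1) (off := off + PySem.Str.len t + 2) (pre := pre ++ [off])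
      (by simp [hpre])
    have hlist : pre ++ [off] ++ pvGS r (off + PySem.Str.len t + 2) = pre ++ pvGS (t :: r) off := by
      simp [pvGS]
    rw [hlist] at hrec
    push_cast at hrec
    simp only [PySem.List.enumerate_cons, List.map_cons, pvGA, hget, hrec]

-- ===== VERDICT (by name: the statement is the Claim_ definition above) =====
theorem build_page_offset_map_py_spec : Claim_equal_build_page_offset_map_py := by
  intro pts _
  unfold Spec_build_page_offset_map_py build_page_offset_map_py build_page_offset_map_py_alt
  rw [portA_foldl pts 0 0 [], starts_foldl pts 0 []]
  simpa using (portB_map pts 0 0 [] rfl).symm
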